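-- pv_equiv track=rewrite | github.com/Manuxxxxx/mtgProject | src/synergy_navigation/calculate_all_synergy.py | batch_pairs
-- ===== SOURCE A (Python) =====
-- def batch_pairs(card_count, chunk_size, start_idx=0):
--     batch = []
--     for i in range(start_idx, card_count):
--         for j in range(i + 1, card_count):
--             batch.append((i, j))
--             if len(batch) >= chunk_size:
--                 yield batch
--                 batch = []
--     if batch:
--         yield batch
-- ===== SOURCE B (Python) =====
-- def batch_pairs(card_count, chunk_size, start_idx=0):
--     # Cursor (i, j) walks the pair grid; each step appends a whole row SEGMENT whose
--     # length is computed arithmetically (room left in the chunk vs pairs left in the row),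
--     # so there is no per-pair length test at all.
--     size = max(1, chunk_size)
--     i, j = start_idx, start_idx + 1
--     chunk = []
--     while i < card_count - 1:
--         need = size - len(chunk)
--         avail = card_count - j
--         if avail > need:
--             chunk += [(i, jj) for jj in range(j, j + need)]
--             j += need
--             yield chunk
--             chunk = []
--         else:
--             chunk += [(i, jj) for jj in range(j, card_count)]
--             i += 1
--             j = i + 1
--             if len(chunk) >= size:
--                 yield chunk
--                 chunk = []
--     if chunk:
--         yield chunk
-- ===== Notes on version B (the rewrite author's own statement) =====
-- stated objective: alternative
-- what changed: B replaces A's per-pair nested loops with inline length test by a cursor (i, j) over the pair grid that appends whole row segments whose lengths are computed arithmetically (room left in the chunk vs pairs left in the row), so chunk boundaries are found by arithmetic instead of testing the batch length after every append.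
import Mathlib
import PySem

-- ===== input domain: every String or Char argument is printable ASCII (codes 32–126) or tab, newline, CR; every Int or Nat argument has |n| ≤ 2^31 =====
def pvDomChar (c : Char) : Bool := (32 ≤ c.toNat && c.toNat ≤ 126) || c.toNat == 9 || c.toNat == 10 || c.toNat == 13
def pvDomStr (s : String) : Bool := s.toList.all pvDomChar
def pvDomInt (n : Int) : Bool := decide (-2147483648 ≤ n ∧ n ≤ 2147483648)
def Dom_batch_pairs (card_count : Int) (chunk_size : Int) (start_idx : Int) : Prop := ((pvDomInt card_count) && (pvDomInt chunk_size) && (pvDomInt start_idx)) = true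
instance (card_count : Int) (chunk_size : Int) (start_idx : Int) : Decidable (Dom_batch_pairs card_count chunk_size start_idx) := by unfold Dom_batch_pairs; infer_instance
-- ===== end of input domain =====

-- B walks the pair grid with a cursor (i, j) and appends whole row SEGMENTS whose lengths are
-- computed arithmetically (room left in the chunk vs pairs left in the row), eliminating A's
-- per-pair length test (objective: alternative). Both are modelled as the list of yielded chunks.


-- ===== PORT A =====
-- state = (batch, yielded chunks); append each (i, j), flush when len(batch) >= chunk_size,
-- yield the trailing partial batch.
def batch_pairs (card_count : Int) (chunk_size : Int) (start_idx : Int) : List (List (Int × Int)) :=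
  let st := (PySem.List.pyRange start_idx card_count 1).foldl
    (fun st i => (PySem.List.pyRange (i + 1) card_count 1).foldl
      (fun (st : List (Int × Int) × List (List (Int × Int))) j =>
        let b := st.1 ++ [(i, j)]
        if chunk_size ≤ (b.length : Int) then ([], st.2 ++ [b]) else (b, st.2)) st)
    ([], [])
  if st.1 = [] then st.2 else st.2 ++ [st.1]

-- ===== PORT B =====
-- [(i, jj) for jj in range(a, b)]
def pvSeg (i a b : Int) : List (Int × Int) :=
  (PySem.List.pyRange a b 1).map (fun jj => (i, jj))

-- B's while loop; state (i, j, chunk, out).  `max 1 …` in `need` is only a totality guard: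
-- at every reachable state chunk.length < size, so it equals Python's need = size - len(chunk).
def pvLoopB (n : Int) (size : Nat) (i j : Int) (chunk : List (Int × Int))
    (out : List (List (Int × Int))) : List (List (Int × Int)) :=
  if h : i < n - 1 then
    let need : Int := max 1 ((size : Int) - chunk.length)
    let avail : Int := n - j
    if h2 : avail > need then
      pvLoopB n size i (j + need) [] (out ++ [chunk ++ pvSeg i j (j + need)])
    else
      let chunk' := chunk ++ pvSeg i j n
      if size ≤ chunk'.length then
        pvLoopB n size (i + 1) (i + 2) [] (out ++ [chunk'])
      else
        pvLoopB n size (i + 1) (i + 2) chunk' out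
  else
    if chunk = [] then out else out ++ [chunk]
termination_by ((n - 1 - i).toNat, (n - j).toNat)
decreasing_by
  · apply Prod.Lex.right
    have h1 : (1 : Int) ≤ max 1 ((size : Int) - chunk.length) := le_max_left _ _
    omega
  · apply Prod.Lex.left; omega
  · apply Prod.Lex.left; omega

def batch_pairs_alt (card_count : Int) (chunk_size : Int) (start_idx : Int) : List (List (Int × Int)) :=
  let size := (max 1 chunk_size).toNat
  pvLoopB card_count size start_idx (start_idx + 1) [] []

-- ===== PRECONDITION & SPEC =====
def Spec_batch_pairs (card_count : Int) (chunk_size : Int) (start_idx : Int) (out : List (List (Int × Int))) : Prop := out = batch_pairs_alt card_count chunk_size start_idx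
instance (card_count : Int) (chunk_size : Int) (start_idx : Int) (out : List (List (Int × Int))) : Decidable (Spec_batch_pairs card_count chunk_size start_idx out) := by unfold Spec_batch_pairs; infer_instance

-- ===== CLAIM =====
def Claim_equal_batch_pairs : Prop := ∀ (card_count : Int) (chunk_size : Int) (start_idx : Int), Dom_batch_pairs card_count chunk_size start_idx → Spec_batch_pairs card_count chunk_size start_idx (batch_pairs card_count chunk_size start_idx)

-- ===== LEMMAS AND PROOFS =====

-- the common intermediate: the pair stream grouped greedily into chunks of `size`
def pvChunk (size : Nat) (l : List (Int × Int)) : List (List (Int × Int)) :=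
  match l with
  | [] => []
  | x :: rest => (x :: rest.take (size - 1)) :: pvChunk size (rest.drop (size - 1))
termination_by l.length
decreasing_by simp

theorem pvChunk_nil (size : Nat) : pvChunk size [] = [] := by rw [pvChunk]

theorem pvChunk_cons (size : Nat) (x : Int × Int) (rest : List (Int × Int)) :
    pvChunk size (x :: rest)
      = (x :: rest.take (size - 1)) :: pvChunk size (rest.drop (size - 1)) := by
  rw [pvChunk]

-- A's flush step over one pair
def pvStep (cs : Int) (st : List (Int × Int) × List (List (Int × Int))) (e : Int × Int) :
    List (Int × Int) × List (List (Int × Int)) :=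
  let b := st.1 ++ [e]
  if cs ≤ (b.length : Int) then ([], st.2 ++ [b]) else (b, st.2)

theorem pvFoldl_flatMap {α β γ : Type} (l : List α) (f : α → List β) (g : γ → β → γ) (init : γ) :
    (l.flatMap f).foldl g init = l.foldl (fun acc i => (f i).foldl g acc) init := by
  induction l generalizing init with
  | nil => rfl
  | cons x xs ih => simp [List.flatMap_cons, List.foldl_append, ih]

theorem pvChunk_short (size : Nat) (b : List (Int × Int)) (hb : b ≠ []) (hlt : b.length < size) :
    pvChunk size b = [b] := by
  cases b with
  | nil => exact absurd rfl hb
  | cons x rest =>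
    rw [pvChunk_cons]
    simp at hlt
    rw [List.take_of_length_le (by omega), List.drop_of_length_le (by omega), pvChunk_nil]

theorem pvChunk_full (size : Nat) (b rest : List (Int × Int)) (hb : b ≠ [])
    (hlen : b.length = size) :
    pvChunk size (b ++ rest) = b :: pvChunk size rest := by
  cases b with
  | nil => exact absurd rfl hb
  | cons x t =>
    rw [List.cons_append, pvChunk_cons]
    simp at hlen
    rw [List.take_append_of_le_length (by omega), List.take_of_length_le (by omega),
        List.drop_append_of_le_length (by omega), List.drop_of_length_le (by omega)]
    simp

theorem pvFold_eq_chunk (cs : Int) (size : Nat) (hs : size = (max 1 cs).toNat)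
    (ps : List (Int × Int)) :
    ∀ (batch : List (Int × Int)) (out : List (List (Int × Int))), batch.length < size →
    (let st := ps.foldl (pvStep cs) (batch, out);
     if st.1 = [] then st.2 else st.2 ++ [st.1]) = out ++ pvChunk size (batch ++ ps) := by
  induction ps with
  | nil =>
    intro batch out hlt
    cases hb : batch with
    | nil => simp [pvChunk_nil]
    | cons x t =>
      subst hb
      simp only [List.foldl_nil, List.append_nil]
      rw [pvChunk_short size _ (by simp) hlt]
      simp
  | cons e rest ih =>
    intro batch out hlt
    simp only [List.foldl_cons]
    have hbne : batch ++ [e] ≠ [] := by simp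
    have hlen1 : (batch ++ [e]).length = batch.length + 1 := by simp
    by_cases hc : cs ≤ ((batch ++ [e]).length : Int)
    · have hfull : (batch ++ [e]).length = size := by omega
      have hstep : pvStep cs (batch, out) e = ([], out ++ [batch ++ [e]]) := by
        simp only [pvStep]
        rw [if_pos hc]
      rw [hstep, ih [] (out ++ [batch ++ [e]]) (by simp; omega)]
      rw [show batch ++ e :: rest = (batch ++ [e]) ++ rest by simp]
      rw [pvChunk_full size _ rest hbne hfull]
      simp
    · have hlt' : (batch ++ [e]).length < size := by omega
      have hstep : pvStep cs (batch, out) e = (batch ++ [e], out) := by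
        simp only [pvStep]
        rw [if_neg hc]
      rw [hstep, ih (batch ++ [e]) out hlt']
      simp

-- ---- B side ----

-- the pairs still to be produced from cursor (i, j)
def pvRest (n i j : Int) : List (Int × Int) :=
  pvSeg i j n ++ (PySem.List.pyRange (i + 1) n 1).flatMap (fun r => pvSeg r (r + 1) n)

theorem pvSeg_length (i a b : Int) : (pvSeg i a b).length = (b - a).toNat := by
  simp [pvSeg, PySem.List.length_pyRange_one]

theorem pvSeg_nil (i a b : Int) (h : b ≤ a) : pvSeg i a b = [] := by
  simp [pvSeg, PySem.List.pyRange_one_eq_nil h]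

theorem pvSeg_append (i a m b : Int) (h1 : a ≤ m) (h2 : m ≤ b) :
    pvSeg i a b = pvSeg i a m ++ pvSeg i m b := by
  simp [pvSeg, PySem.List.pyRange_one_append a m b h1 h2]

theorem pvLoopB_eq_chunk (n : Int) (size : Nat) (hsz : 1 ≤ size) :
    ∀ (k : Nat) (i j : Int) (chunk : List (Int × Int)) (out : List (List (Int × Int))),
      (n - 1 - i).toNat * (n - 1 - i).toNat + (n - j).toNat ≤ k →
      i + 1 ≤ j → chunk.length < size →
      pvLoopB n size i j chunk out = out ++ pvChunk size (chunk ++ pvRest n i j) := by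
  intro k
  induction k with
  | zero =>
    intro i j chunk out hk hij hlt
    have hA0 : (n - 1 - i).toNat * (n - 1 - i).toNat = 0 := by omega
    have hA : (n - 1 - i).toNat = 0 := by
      rcases Nat.mul_eq_zero.mp hA0 with h | h <;> exact h
    have hni : ¬ i < n - 1 := by omega
    rw [pvLoopB, dif_neg hni]
    have hrest : pvRest n i j = [] := by
      rw [pvRest, pvSeg_nil _ _ _ (by omega), PySem.List.pyRange_one_eq_nil (by omega)]
      simp
    rw [hrest, List.append_nil]
    cases hc : chunk with
    | nil => simp [pvChunk_nil]
    | cons x t =>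
      rw [pvChunk_short size _ (by simp) (hc ▸ hlt)]
      simp
  | succ k ih =>
    intro i j chunk out hk hij hlt
    by_cases hi : i < n - 1
    · rw [pvLoopB, dif_pos hi]
      have hneed : max 1 ((size : Int) - chunk.length) = (size : Int) - chunk.length := by
        rw [max_eq_right]; omega
      rw [hneed]
      by_cases h2 : n - j > (size : Int) - chunk.length
      · rw [dif_pos h2]
        have hfull : (chunk ++ pvSeg i j (j + ((size : Int) - chunk.length))).length = size := by
          rw [List.length_append, pvSeg_length]
          omega
        have hsplit : chunk ++ pvRest n i j
            = (chunk ++ pvSeg i j (j + ((size : Int) - chunk.length)))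
              ++ pvRest n i (j + ((size : Int) - chunk.length)) := by
          rw [pvRest, pvRest, pvSeg_append i j (j + ((size : Int) - chunk.length)) n (by omega) (by omega)]
          simp
        rw [ih i (j + ((size : Int) - chunk.length)) [] _ (by omega) (by omega)
              (by simp only [List.length_nil]; omega)]
        rw [hsplit, pvChunk_full size _ _
              (by intro h; rw [h] at hfull; simp only [List.length_nil] at hfull; omega) hfull]
        simp
      · rw [dif_neg h2]
        have hlen' : (chunk ++ pvSeg i j n).length ≤ size := by
          rw [List.length_append, pvSeg_length]; omega
        have hmeas : (n - 1 - (i + 1)).toNat * (n - 1 - (i + 1)).toNat + (n - (i + 2)).toNat ≤ k := by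
          have h1 : (n - 1 - (i + 1)).toNat + 1 = (n - 1 - i).toNat := by omega
          have h2' : (n - (i + 2)).toNat = (n - 1 - (i + 1)).toNat := by omega
          nlinarith [hk, h1, h2']
        have hsplit : chunk ++ pvRest n i j = (chunk ++ pvSeg i j n) ++ pvRest n (i + 1) (i + 2) := by
          rw [pvRest, pvRest, PySem.List.pyRange_one_cons (show i + 1 < n by omega)]
          simp only [List.flatMap_cons, pvSeg]
          rw [show i + 1 + 1 = i + 2 from by ring]
          simp
        by_cases h3 : size ≤ (chunk ++ pvSeg i j n).length
        · rw [if_pos h3]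
          have hfull : (chunk ++ pvSeg i j n).length = size := by omega
          rw [ih (i + 1) (i + 2) [] _ hmeas (by omega) (by simp only [List.length_nil]; omega)]
          rw [hsplit, pvChunk_full size _ _
                (by intro h; rw [h] at hfull; simp only [List.length_nil] at hfull; omega) hfull]
          simp
        · rw [if_neg h3]
          rw [ih (i + 1) (i + 2) (chunk ++ pvSeg i j n) out hmeas (by omega) (by omega)]
          rw [hsplit]
    · rw [pvLoopB, dif_neg hi]
      have hrest : pvRest n i j = [] := by
        rw [pvRest, pvSeg_nil _ _ _ (by omega), PySem.List.pyRange_one_eq_nil (by omega)]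
        simp
      rw [hrest, List.append_nil]
      cases hc : chunk with
      | nil => simp [pvChunk_nil]
      | cons x t =>
        rw [pvChunk_short size _ (by simp) (hc ▸ hlt)]
        simp

-- ===== VERDICT =====
theorem batch_pairs_spec : Claim_equal_batch_pairs := by
  intro n cs s _
  show batch_pairs n cs s = batch_pairs_alt n cs s
  unfold batch_pairs batch_pairs_alt
  have hsz : 1 ≤ (max 1 cs).toNat := by omega
  -- A side: fold = pvChunk of the flat pair stream
  rw [show (fun (st : List (Int × Int) × List (List (Int × Int))) i =>
        (PySem.List.pyRange (i + 1) n 1).foldl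
          (fun st j =>
            let b := st.1 ++ [(i, j)]
            if cs ≤ (b.length : Int) then ([], st.2 ++ [b]) else (b, st.2)) st)
      = (fun st i => ((PySem.List.pyRange (i + 1) n 1).map (fun j => (i, j))).foldl
          (pvStep cs) st) from by
    funext st i
    rw [List.foldl_map]
    rfl]
  rw [← pvFoldl_flatMap]
  rw [pvFold_eq_chunk cs _ rfl _ [] [] (by simp only [List.length_nil]; omega)]
  -- B side: loop = pvChunk of the same stream
  rw [pvLoopB_eq_chunk n (max 1 cs).toNat hsz
        ((n - 1 - s).toNat * (n - 1 - s).toNat + (n - (s + 1)).toNat) s (s + 1) [] []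
        le_rfl (by omega) (by simp only [List.length_nil]; omega)]
  -- the two pair streams coincide
  simp only [List.nil_append]
  congr 1
  rw [pvRest]
  by_cases hs : s < n
  · rw [PySem.List.pyRange_one_cons hs]
    simp [List.flatMap_cons, pvSeg]
  · rw [pvSeg_nil _ _ _ (by omega), PySem.List.pyRange_one_eq_nil (by omega),
        PySem.List.pyRange_one_eq_nil (by omega)]
    simp
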